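-- pv_equiv track=rewrite | github.com/junbangg/Algorithm-Study | Codility/RectangleBuilderGreaterArea/solution.py | solution
-- ===== SOURCE A (Python) =====
-- from itertools import combinations_with_replacement
-- from collections import Counter
--
-- def solution(A, X):
--     count = Counter(A)
--     edges = combinations_with_replacement(list(set(A)), 2)
--     answer = 0
--
--     for x, y in edges:
--         if x * y < X:
--             continue
--         if x == y:
--             if count[x] >= 4:
--                 answer += 1
--         elif count[x] >= 2 and count[y] >= 2:
--             answer += 1
--     return answer if answer <= 1000000000 else -1
-- ===== SOURCE B (Python) =====
-- from collections import Counter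
--
--
-- def _bisect_left(S, t):
--     # stdlib bisect.bisect_left, written out because this module may not import bisect
--     lo, hi = 0, len(S)
--     while lo < hi:
--         mid = (lo + hi) // 2
--         if S[mid] < t:
--             lo = mid + 1
--         else:
--             hi = mid
--     return lo
--
--
-- def solution(A, X):
--     cnt = Counter(A)
--     S = sorted(v for v in cnt if cnt[v] >= 2)   # distinct eligible lengths, ascending
--     n = len(S)
--     answer = 0
--     for i, x in enumerate(S):
--         if cnt[x] >= 4 and x * x >= X:
--             answer += 1                          # square with side x
--         if x > 0:
--             t = -((-X) // x)                     # ceil(X / x): need partner y >= t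
--             answer += n - max(_bisect_left(S, t), i + 1)
--         elif x < 0:
--             t = X // x                           # floor(X / x): need partner y <= t
--             answer += max(_bisect_left(S, t + 1) - (i + 1), 0)
--         elif X <= 0:                             # x == 0: any partner works iff X <= 0
--             answer += n - (i + 1)
--     return answer if answer <= 1000000000 else -1
-- ===== Notes on version B (the rewrite author's own statement) =====
-- stated objective: faster
-- what changed: A enumerates all O(U^2) combinations-with-replacement of the distinct values and tests multiplicities and x*y>=X inside the double loop; B instead sorts the distinct values of multiplicity>=2 and, for each value x, finds the partner threshold (ceil(X/x) for x>0, floor(X/x) for x<0, sign-cased) by binary search in the sorted list, so no pairwise scan is performed.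
import Mathlib
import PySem

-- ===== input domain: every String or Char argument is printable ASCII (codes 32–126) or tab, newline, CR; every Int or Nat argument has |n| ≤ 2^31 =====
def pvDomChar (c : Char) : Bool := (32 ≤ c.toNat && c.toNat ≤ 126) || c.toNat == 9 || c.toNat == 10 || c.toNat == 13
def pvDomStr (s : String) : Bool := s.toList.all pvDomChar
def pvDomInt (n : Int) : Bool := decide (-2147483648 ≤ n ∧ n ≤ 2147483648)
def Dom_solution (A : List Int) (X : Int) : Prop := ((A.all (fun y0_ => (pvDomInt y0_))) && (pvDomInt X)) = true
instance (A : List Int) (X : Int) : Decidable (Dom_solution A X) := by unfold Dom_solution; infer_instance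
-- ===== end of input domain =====

-- B replaces A's quadratic scan over all value pairs by sorting the eligible lengths and
-- binary-searching, for each length, the partner threshold (sign-cased); objective: faster.

-- ===== PORT A =====
-- itertools.combinations_with_replacement(l, 2), in Python's order
def cwr2 : List Int → List (Int × Int)
  | [] => []
  | x :: xs => (x :: xs).map (fun y => (x, y)) ++ cwr2 xs

def solution (A : List Int) (X : Int) : Int :=
  let count := PySem.Dict.counter A
  let edges := cwr2 (PySem.Set.ofList A)
  let answer : Int := edges.foldl (fun acc p =>
    if p.1 * p.2 < X then acc
    else if p.1 = p.2 then (if 4 ≤ count.getD p.1 0 then acc + 1 else acc)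
    else if 2 ≤ count.getD p.1 0 ∧ 2 ≤ count.getD p.2 0 then acc + 1 else acc) 0
  if answer ≤ 1000000000 then answer else -1

-- ===== PORT B =====
-- Source B's _bisect_left is literally stdlib bisect.bisect_left (written out because Source B may not
-- import bisect); it is ported as the corresponding prelude primitive PySem.List.bisectLeft.
def solution_alt (A : List Int) (X : Int) : Int :=
  let cnt := PySem.Dict.counter A
  let S := PySem.List.sorted (cnt.keys.filter (fun v => decide (2 ≤ cnt.getD v 0))) (fun v => v) false
  let n := S.length
  let answer : Int := (PySem.List.enumerate S).foldl (fun answer e =>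
    let i := e.1
    let x := e.2
    let answer := if 4 ≤ cnt.getD x 0 ∧ X ≤ x * x then answer + 1 else answer
    if 0 < x then
      let t := -(PySem.Int.floordiv (-X) x)
      answer + ((n : Int) - max ((PySem.List.bisectLeft S t : Nat) : Int) (i + 1))
    else if x < 0 then
      let t := PySem.Int.floordiv X x
      answer + max (((PySem.List.bisectLeft S (t + 1) : Nat) : Int) - (i + 1)) 0
    else if X ≤ 0 then
      answer + ((n : Int) - (i + 1))
    else answer) 0
  if answer ≤ 1000000000 then answer else -1

-- ===== PRECONDITION & SPEC =====
def Spec_solution (A : List Int) (X : Int) (out : Int) : Prop := out = solution_alt A X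
instance (A : List Int) (X : Int) (out : Int) : Decidable (Spec_solution A X out) := by unfold Spec_solution; infer_instance

-- ===== CLAIM =====
def Claim_equal_solution : Prop := ∀ (A : List Int) (X : Int), Dom_solution A X → Spec_solution A X (solution A X)

-- ===== LEMMAS AND PROOFS =====

-- A's pair condition, as a predicate on a pair of values (c = the Counter)
def predA (c : PySem.Dict Int Int) (X : Int) : Int × Int → Bool := fun p =>
  decide (¬ p.1 * p.2 < X ∧ (if p.1 = p.2 then 4 ≤ c.getD p.1 0 else 2 ≤ c.getD p.1 0 ∧ 2 ≤ c.getD p.2 0))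

-- strict pairs of s (in order), counted with the multiplicity conditions inside the predicate
def pcStrict (c : PySem.Dict Int Int) (X : Int) : List Int → Nat
  | [] => 0
  | x :: xs => xs.countP (fun y => decide (2 ≤ c.getD x 0 ∧ 2 ≤ c.getD y 0 ∧ X ≤ x * y)) + pcStrict c X xs

-- strict pairs of an (already filtered) list, product condition only
def pcQ (X : Int) : List Int → Nat
  | [] => 0
  | x :: xs => xs.countP (fun y => decide (X ≤ x * y)) + pcQ X xs

-- B's per-element cross contribution, extracted from solution_alt's loop body
def crossTerm (S : List Int) (X : Int) (i x : Int) : Int :=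
  if 0 < x then
    (S.length : Int) - max ((PySem.List.bisectLeft S (-(PySem.Int.floordiv (-X) x)) : Nat) : Int) (i + 1)
  else if x < 0 then
    max (((PySem.List.bisectLeft S (PySem.Int.floordiv X x + 1) : Nat) : Int) - (i + 1)) 0
  else if X ≤ 0 then (S.length : Int) - (i + 1)
  else 0

lemma foldA_eq_countP (c : PySem.Dict Int Int) (X : Int) (l : List (Int × Int)) (acc : Int) :
    l.foldl (fun acc p =>
      if p.1 * p.2 < X then acc
      else if p.1 = p.2 then (if 4 ≤ c.getD p.1 0 then acc + 1 else acc)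
      else if 2 ≤ c.getD p.1 0 ∧ 2 ≤ c.getD p.2 0 then acc + 1 else acc) acc
      = acc + (l.countP (predA c X) : Int) := by
  induction l generalizing acc with
  | nil => simp
  | cons p l ih =>
    rw [List.foldl_cons, ih, List.countP_cons]
    by_cases hp : (¬ p.1 * p.2 < X ∧ (if p.1 = p.2 then 4 ≤ c.getD p.1 0 else 2 ≤ c.getD p.1 0 ∧ 2 ≤ c.getD p.2 0))
    · rw [if_pos (show predA c X p = true from decide_eq_true hp)]
      obtain ⟨hA, hB⟩ := hp
      rw [if_neg hA]
      by_cases h2 : p.1 = p.2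
      · rw [if_pos h2] at hB
        rw [if_pos h2, if_pos hB]
        push_cast; ring
      · rw [if_neg h2] at hB
        rw [if_neg h2, if_pos hB]
        push_cast; ring
    · rw [if_neg (show ¬ predA c X p = true from by simpa [predA] using hp)]
      by_cases hA : p.1 * p.2 < X
      · rw [if_pos hA]; push_cast; ring
      · have hB : ¬ (if p.1 = p.2 then 4 ≤ c.getD p.1 0 else 2 ≤ c.getD p.1 0 ∧ 2 ≤ c.getD p.2 0) :=
          fun hb => hp ⟨hA, hb⟩
        rw [if_neg hA]
        by_cases h2 : p.1 = p.2
        · rw [if_pos h2] at hB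
          rw [if_pos h2, if_neg hB]
          push_cast; ring
        · rw [if_neg h2] at hB
          rw [if_neg h2, if_neg hB]
          push_cast; ring

lemma countP_cwr2 (c : PySem.Dict Int Int) (X : Int) (s : List Int) (h : s.Nodup) :
    (cwr2 s).countP (predA c X)
      = s.countP (fun v => decide (4 ≤ c.getD v 0 ∧ X ≤ v * v)) + pcStrict c X s := by
  induction s with
  | nil => simp [cwr2, pcStrict]
  | cons x xs ih =>
    have hx : x ∉ xs := (List.nodup_cons.mp h).1
    have hxs : xs.Nodup := (List.nodup_cons.mp h).2
    simp only [cwr2, List.countP_append, List.map_cons, List.countP_cons, List.countP_map,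
      pcStrict, ih hxs]
    have hdiag : predA c X (x, x) = decide (4 ≤ c.getD x 0 ∧ X ≤ x * x) := by
      simp [predA, not_lt, Bool.and_comm]
    have hstr : xs.countP (predA c X ∘ fun y => (x, y))
        = xs.countP (fun y => decide (2 ≤ c.getD x 0 ∧ 2 ≤ c.getD y 0 ∧ X ≤ x * y)) := by
      apply List.countP_congr
      intro y hy
      have hne : x ≠ y := fun e => hx (e ▸ hy)
      simp only [Function.comp_apply, predA, hne, if_false, not_lt, decide_eq_true_eq]
      tauto
    rw [hdiag, hstr]
    ring

-- strict-pair count over the filtered list = strict-pair count with the filter folded into the predicate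
lemma pcQ_filter (c : PySem.Dict Int Int) (X : Int) (s : List Int) :
    pcQ X (s.filter (fun v => decide (2 ≤ c.getD v 0))) = pcStrict c X s := by
  induction s with
  | nil => simp [pcQ, pcStrict]
  | cons x xs ih =>
    by_cases hx : 2 ≤ c.getD x 0
    · rw [List.filter_cons_of_pos (by simpa using hx)]
      simp only [pcQ, ih, pcStrict, List.countP_filter]
      congr 1
      apply List.countP_congr
      intro y _
      simp only [Bool.and_eq_true, decide_eq_true_eq]
      constructor
      · rintro ⟨hq, h2⟩; exact ⟨hx, h2, hq⟩
      · rintro ⟨_, h2, hq⟩; exact ⟨hq, h2⟩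
    · rw [List.filter_cons_of_neg (by simpa using hx)]
      simp only [pcStrict]
      have hz : xs.countP (fun y => decide (2 ≤ c.getD x 0 ∧ 2 ≤ c.getD y 0 ∧ X ≤ x * y)) = 0 := by
        apply List.countP_eq_zero.mpr
        intro y _
        simp [hx]
      omega

-- the ordered-pair count over a Nodup list is exactly twice the strict-pair count
lemma ordered_eq_two_pcQ (X : Int) (l : List Int) (h : l.Nodup) :
    (l.map (fun x => l.countP (fun y => decide (y ≠ x ∧ X ≤ x * y)))).sum = 2 * pcQ X l := by
  induction l with
  | nil => simp [pcQ]
  | cons x xs ih =>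
    have hx : x ∉ xs := (List.nodup_cons.mp h).1
    have hxs : xs.Nodup := (List.nodup_cons.mp h).2
    have h1 : (x :: xs).countP (fun y => decide (y ≠ x ∧ X ≤ x * y))
        = xs.countP (fun y => decide (X ≤ x * y)) := by
      rw [List.countP_cons]
      have hself : (decide (x ≠ x ∧ X ≤ x * x) : Bool) = false := by simp
      rw [hself]
      simp only [Bool.false_eq_true, if_false, Nat.add_zero]
      apply List.countP_congr
      intro y hy
      have hne : y ≠ x := fun e => hx (e ▸ hy)
      simp [hne]
    have hsplit : ∀ (g1 g2 : Int → Nat) (L : List Int),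
        (L.map (fun z => g1 z + g2 z)).sum = (L.map g1).sum + (L.map g2).sum := by
      intro g1 g2 L
      induction L with
      | nil => simp
      | cons a L ihL => simp [ihL]; omega
    have hind : ∀ L : List Int, (L.map (fun z => if X ≤ z * x then 1 else 0)).sum
        = L.countP (fun z => decide (X ≤ z * x)) := by
      intro L
      induction L with
      | nil => simp
      | cons a L ihL =>
        rw [List.map_cons, List.sum_cons, List.countP_cons, ihL]
        by_cases hq : X ≤ a * x <;> simp [hq] <;> omega
    have h2 : (xs.map (fun z => (x :: xs).countP (fun y => decide (y ≠ z ∧ X ≤ z * y)))).sum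
        = xs.countP (fun z => decide (X ≤ x * z))
          + (xs.map (fun z => xs.countP (fun y => decide (y ≠ z ∧ X ≤ z * y)))).sum := by
      have hmap : ∀ z ∈ xs, (x :: xs).countP (fun y => decide (y ≠ z ∧ X ≤ z * y))
          = (if X ≤ z * x then 1 else 0) + xs.countP (fun y => decide (y ≠ z ∧ X ≤ z * y)) := by
        intro z hz
        have hne : x ≠ z := fun e => hx (e ▸ hz)
        rw [List.countP_cons]
        by_cases hq : X ≤ z * x <;> simp [hne, hq] <;> omega
      rw [List.map_congr_left hmap, hsplit, hind]
      congr 1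
      apply List.countP_congr
      intro z _
      simp [mul_comm]
    rw [List.map_cons, List.sum_cons, h1, h2, ih hxs]
    simp only [pcQ]
    ring

-- pcQ is invariant under permutation of a Nodup list (both counts are half the ordered count)
lemma pcQ_perm (X : Int) (l l' : List Int) (h : l.Perm l') (hnd : l.Nodup) :
    pcQ X l = pcQ X l' := by
  have hnd' : l'.Nodup := h.nodup_iff.mp hnd
  have h1 := ordered_eq_two_pcQ X l hnd
  have h2 := ordered_eq_two_pcQ X l' hnd'
  have hmapeq : (l.map (fun x => l.countP (fun y => decide (y ≠ x ∧ X ≤ x * y)))).sum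
      = (l'.map (fun x => l'.countP (fun y => decide (y ≠ x ∧ X ≤ x * y)))).sum := by
    have hfeq : ∀ x ∈ l, l.countP (fun y => decide (y ≠ x ∧ X ≤ x * y))
        = l'.countP (fun y => decide (y ≠ x ∧ X ≤ x * y)) := fun x _ => h.countP_eq _
    rw [List.map_congr_left hfeq]
    exact (h.map _).sum_eq
  omega

-- counting a prefix-shaped predicate: if pred holds exactly on indices < q, countP = min q len
lemma countP_of_iff_lt (L : List Int) (p : Int → Bool) (q : Nat)
    (h : ∀ j (hj : j < L.length), p L[j] = true ↔ j < q) :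
    L.countP p = min q L.length := by
  induction L generalizing q with
  | nil => simp
  | cons a L ih =>
    have h0 := h 0 (by simp)
    cases q with
    | zero =>
      have hpa : p a = false := by
        by_contra hne
        have hpt : p a = true := by revert hne; cases (p a) <;> simp
        exact absurd (h0.mp hpt) (by omega)
      rw [List.countP_cons, hpa]
      have := ih 0 (fun j hj => by
        have := h (j + 1) (by simpa using Nat.succ_lt_succ hj)
        simpa using this)
      simpa using this
    | succ q' =>
      have hpa : p a = true := h0.mpr (by omega)
      have := ih q' (fun j hj => by
        have := h (j + 1) (by simpa using Nat.succ_lt_succ hj)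
        simpa [Nat.succ_lt_succ_iff] using this)
      rw [List.countP_cons, hpa, if_pos rfl, this]
      simp only [List.length_cons]
      omega

-- counting a suffix-shaped predicate: if pred holds exactly on indices ≥ q, countP = len - min q len
lemma countP_of_iff_ge (L : List Int) (p : Int → Bool) (q : Nat)
    (h : ∀ j (hj : j < L.length), p L[j] = true ↔ q ≤ j) :
    L.countP p = L.length - min q L.length := by
  have hnot : L.countP (fun y => !p y) = min q L.length := by
    apply countP_of_iff_lt
    intro j hj
    have hiffj := h j hj
    by_cases hp : p L[j] = true
    · have hq : q ≤ j := hiffj.mp hp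
      simp only [hp, Bool.not_true]
      constructor
      · intro hfalse; exact absurd hfalse (by simp)
      · intro hlt; omega
    · have hf : p L[j] = false := by revert hp; cases (p L[j]) <;> simp
      have hq : ¬ q ≤ j := fun hle => by simp [hiffj.mpr hle] at hf
      simp only [hf, Bool.not_false]
      constructor
      · intro _; omega
      · intro _; trivial
  have htot : L.length = L.countP p + L.countP (fun y => !p y) := by
    simpa using List.length_eq_countP_add_countP (l := L) p
  omega

-- the core step: B's binary-search contribution at index k equals the tail count of valid partners
lemma crossTerm_eq (S : List Int) (X : Int) (hs : List.Pairwise (· ≤ ·) S)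
    (k : Nat) (hk : k < S.length) :
    crossTerm S X (k : Int) S[k]
      = (((S.drop (k + 1)).countP (fun y => decide (X ≤ S[k] * y)) : Nat) : Int) := by
  have hdl : (S.drop (k + 1)).length = S.length - (k + 1) := List.length_drop
  by_cases hx : 0 < S[k]
  · -- positive x: valid partners are y ≥ ceil(X/x), a suffix of the sorted list
    set t := -(PySem.Int.floordiv (-X) S[k]) with ht
    have htc : (t - 1) * S[k] < X ∧ X ≤ t * S[k] :=
      (PySem.Int.neg_floordiv_neg_eq_iff_of_pos hx).mp ht.symm
    have hiff : ∀ y : Int, X ≤ S[k] * y ↔ t ≤ y := by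
      intro y
      constructor
      · intro hle
        by_contra hlt
        have hy : y ≤ t - 1 := by omega
        have := mul_le_mul_of_nonneg_right hy (le_of_lt hx)
        nlinarith [htc.1]
      · intro hle
        have := mul_le_mul_of_nonneg_right hle (le_of_lt hx)
        nlinarith [htc.2]
    obtain ⟨hb1, hb2, hb3⟩ := PySem.List.bisectLeft_spec S t hs
    set b := PySem.List.bisectLeft S t with hbdef
    have hcount : (S.drop (k + 1)).countP (fun y => decide (X ≤ S[k] * y))
        = (S.drop (k + 1)).length - min (b - (k + 1)) (S.drop (k + 1)).length := by
      apply countP_of_iff_ge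
      intro j hj
      have hj' : k + 1 + j < S.length := by omega
      rw [List.getElem_drop]
      simp only [decide_eq_true_eq, hiff]
      constructor
      · intro hty
        by_contra hlt
        have : k + 1 + j < b := by omega
        have := hb2 (k + 1 + j) hj' this
        omega
      · intro hge
        exact hb3 (k + 1 + j) hj' (by omega)
    simp only [crossTerm, if_pos hx, ← ht, ← hbdef, hcount]
    rw [hdl]
    omega
  · by_cases hxn : S[k] < 0
    · -- negative x: valid partners are y ≤ floor(X/x), a prefix of the sorted list
      set t := PySem.Int.floordiv X S[k] with ht
      have hdm := PySem.Int.floordiv_mul_add_mod X S[k]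
      have hr := PySem.Int.mod_neg_bounds X hxn
      have hiff : ∀ y : Int, X ≤ S[k] * y ↔ y ≤ t := by
        intro y
        constructor
        · intro hle
          by_contra hlt
          have hy : t + 1 ≤ y := by omega
          have := mul_le_mul_of_nonpos_left hy (le_of_lt hxn)
          nlinarith
        · intro hle
          have := mul_le_mul_of_nonpos_left hle (le_of_lt hxn)
          nlinarith
      obtain ⟨hb1, hb2, hb3⟩ := PySem.List.bisectLeft_spec S (t + 1) hs
      set b := PySem.List.bisectLeft S (t + 1) with hbdef
      have hcount : (S.drop (k + 1)).countP (fun y => decide (X ≤ S[k] * y))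
          = min (b - (k + 1)) (S.drop (k + 1)).length := by
        apply countP_of_iff_lt
        intro j hj
        have hj' : k + 1 + j < S.length := by omega
        rw [List.getElem_drop]
        simp only [decide_eq_true_eq, hiff]
        constructor
        · intro hty
          by_contra hlt
          have := hb3 (k + 1 + j) hj' (by omega)
          omega
        · intro hlt
          have := hb2 (k + 1 + j) hj' (by omega)
          omega
      simp only [crossTerm, if_neg hx, if_pos hxn, ← ht, ← hbdef, hcount]
      rw [hdl]
      push_cast
      omega
    · -- x = 0: every partner works iff X ≤ 0
      have hx0 : S[k] = 0 := by omega
      by_cases hX : X ≤ 0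
      · have hcount : (S.drop (k + 1)).countP (fun y => decide (X ≤ S[k] * y))
            = (S.drop (k + 1)).length := by
          apply List.countP_eq_length.mpr
          intro y _
          simp [hx0, hX]
        simp only [crossTerm, if_neg hx, if_neg hxn, if_pos hX, hcount]
        rw [hdl]
        omega
      · have hcount : (S.drop (k + 1)).countP (fun y => decide (X ≤ S[k] * y)) = 0 := by
          apply List.countP_eq_zero.mpr
          intro y _
          simp only [hx0, zero_mul, decide_eq_true_eq]
          omega
        simp [crossTerm, if_neg hx, if_neg hxn, if_neg hX, hcount]

-- summing the tail counts over the enumeration yields the strict-pair count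
lemma sum_drops (X : Int) (T : List Int) : ∀ (s : Nat) (S : List Int), S.drop s = T →
    ((PySem.List.enumerate T (s : Int)).map
      (fun e => (((S.drop (e.1.toNat + 1)).countP (fun y => decide (X ≤ e.2 * y)) : Nat) : Int))).sum
      = (pcQ X T : Int) := by
  induction T with
  | nil => intro s S _; simp [pcQ, PySem.List.enumerate_nil]
  | cons x T' ih =>
    intro s S hdrop
    have hT' : S.drop (s + 1) = T' := by
      have h1 : (S.drop s).drop 1 = T' := by rw [hdrop]; rfl
      rwa [List.drop_drop] at h1
    rw [PySem.List.enumerate_cons, List.map_cons, List.sum_cons]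
    have hcast : ((s : Int) + 1) = (((s + 1 : Nat) : Nat) : Int) := by push_cast; ring
    rw [hcast, ih (s + 1) S hT']
    have hts : ((s : Int)).toNat = s := Int.toNat_natCast s
    rw [hts, hT']
    simp only [pcQ]
    push_cast
    ring

-- the two loop values agree, for any counter c and any Nodup value list sl
lemma loops_eq (c : PySem.Dict Int Int) (X : Int) (sl : List Int) (hnd : sl.Nodup) :
    (cwr2 sl).foldl (fun acc p =>
      if p.1 * p.2 < X then acc
      else if p.1 = p.2 then (if 4 ≤ c.getD p.1 0 then acc + 1 else acc)
      else if 2 ≤ c.getD p.1 0 ∧ 2 ≤ c.getD p.2 0 then acc + 1 else acc) 0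
    = (PySem.List.enumerate (PySem.List.sorted (sl.filter (fun v => decide (2 ≤ c.getD v 0))) (fun v => v) false)).foldl
      (fun answer e =>
        if 0 < e.2 then
          (if 4 ≤ c.getD e.2 0 ∧ X ≤ e.2 * e.2 then answer + 1 else answer)
            + (((PySem.List.sorted (sl.filter (fun v => decide (2 ≤ c.getD v 0))) (fun v => v) false).length : Int)
              - max ((PySem.List.bisectLeft (PySem.List.sorted (sl.filter (fun v => decide (2 ≤ c.getD v 0))) (fun v => v) false)
                  (-(PySem.Int.floordiv (-X) e.2)) : Nat) : Int) (e.1 + 1))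
        else if e.2 < 0 then
          (if 4 ≤ c.getD e.2 0 ∧ X ≤ e.2 * e.2 then answer + 1 else answer)
            + max (((PySem.List.bisectLeft (PySem.List.sorted (sl.filter (fun v => decide (2 ≤ c.getD v 0))) (fun v => v) false)
                  (PySem.Int.floordiv X e.2 + 1) : Nat) : Int) - (e.1 + 1)) 0
        else if X ≤ 0 then
          (if 4 ≤ c.getD e.2 0 ∧ X ≤ e.2 * e.2 then answer + 1 else answer)
            + (((PySem.List.sorted (sl.filter (fun v => decide (2 ≤ c.getD v 0))) (fun v => v) false).length : Int) - (e.1 + 1))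
        else (if 4 ≤ c.getD e.2 0 ∧ X ≤ e.2 * e.2 then answer + 1 else answer)) 0 := by
  set F := sl.filter (fun v => decide (2 ≤ c.getD v 0)) with hF
  set S := PySem.List.sorted F (fun v => v) false with hS
  have hndF : F.Nodup := hnd.filter _
  have hperm : S.Perm F := PySem.List.sorted_perm F (fun v => v) false
  have hsorted : List.Pairwise (· ≤ ·) S := by
    have := PySem.List.sorted_pairwise F (fun v => v)
    simpa using this
  -- A's loop value
  rw [foldA_eq_countP, countP_cwr2 c X sl hnd]
  -- B's loop body is "accumulator plus a per-element contribution"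
  have hbody : (fun (answer : Int) (e : Int × Int) =>
      if 0 < e.2 then
        (if 4 ≤ c.getD e.2 0 ∧ X ≤ e.2 * e.2 then answer + 1 else answer)
          + ((S.length : Int)
            - max ((PySem.List.bisectLeft S (-(PySem.Int.floordiv (-X) e.2)) : Nat) : Int) (e.1 + 1))
      else if e.2 < 0 then
        (if 4 ≤ c.getD e.2 0 ∧ X ≤ e.2 * e.2 then answer + 1 else answer)
          + max (((PySem.List.bisectLeft S (PySem.Int.floordiv X e.2 + 1) : Nat) : Int) - (e.1 + 1)) 0
      else if X ≤ 0 then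
        (if 4 ≤ c.getD e.2 0 ∧ X ≤ e.2 * e.2 then answer + 1 else answer)
          + ((S.length : Int) - (e.1 + 1))
      else (if 4 ≤ c.getD e.2 0 ∧ X ≤ e.2 * e.2 then answer + 1 else answer))
      = fun (answer : Int) (e : Int × Int) =>
        answer + ((if 4 ≤ c.getD e.2 0 ∧ X ≤ e.2 * e.2 then 1 else 0) + crossTerm S X e.1 e.2) := by
    funext answer e
    simp only [crossTerm]
    split_ifs <;> ring
  rw [hbody, PySem.List.foldl_add, PySem.List.sum_map_add_int]
  have hsq : ((PySem.List.enumerate S).map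
      (fun e => if 4 ≤ c.getD e.2 0 ∧ X ≤ e.2 * e.2 then (1 : Int) else 0)).sum
      = ((S.countP (fun v => decide (4 ≤ c.getD v 0 ∧ X ≤ v * v)) : Nat) : Int) := by
    have hmap : (PySem.List.enumerate S).map
        (fun e => if 4 ≤ c.getD e.2 0 ∧ X ≤ e.2 * e.2 then (1 : Int) else 0)
        = S.map (fun v => if (fun v => decide (4 ≤ c.getD v 0 ∧ X ≤ v * v)) v = true then (1 : Int) else 0) := by
      rw [show S.map _ = ((PySem.List.enumerate S 0).map (fun e => e.2)).map
          (fun v => if (fun v => decide (4 ≤ c.getD v 0 ∧ X ≤ v * v)) v = true then (1 : Int) else 0)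
        from by rw [PySem.List.map_snd_enumerate], List.map_map]
      apply List.map_congr_left
      intro e _
      simp
    rw [hmap, PySem.List.sum_map_ite_one_zero]
  have hcross : ((PySem.List.enumerate S).map (fun e => crossTerm S X e.1 e.2)).sum
      = (pcQ X S : Int) := by
    have hcongr : ∀ e ∈ PySem.List.enumerate S 0,
        crossTerm S X e.1 e.2
          = (((S.drop (e.1.toNat + 1)).countP (fun y => decide (X ≤ e.2 * y)) : Nat) : Int) := by
      intro e he
      obtain ⟨k, hklt, rfl⟩ := (PySem.List.mem_enumerate_iff S 0 e).mp he
      simp only [zero_add, Int.toNat_natCast]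
      exact crossTerm_eq S X hsorted k hklt
    calc ((PySem.List.enumerate S).map (fun e => crossTerm S X e.1 e.2)).sum
        = ((PySem.List.enumerate S ((0 : Nat) : Int)).map
            (fun e => (((S.drop (e.1.toNat + 1)).countP (fun y => decide (X ≤ e.2 * y)) : Nat) : Int))).sum := by
          exact congrArg List.sum (List.map_congr_left hcongr)
      _ = (pcQ X S : Int) := sum_drops X S 0 S (by simp)
  rw [hsq, hcross]
  -- identify the square counts and the strict-pair counts on both sides
  have hsqP : S.countP (fun v => decide (4 ≤ c.getD v 0 ∧ X ≤ v * v))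
      = sl.countP (fun v => decide (4 ≤ c.getD v 0 ∧ X ≤ v * v)) := by
    rw [hperm.countP_eq, hF, List.countP_filter]
    apply List.countP_congr
    intro v _
    simp only [Bool.and_eq_true, decide_eq_true_eq]
    constructor
    · rintro ⟨h4, _⟩; exact h4
    · rintro ⟨h4, hX⟩; exact ⟨⟨h4, hX⟩, by omega⟩
  have hpcQ : pcQ X S = pcStrict c X sl := by
    rw [pcQ_perm X S F hperm (hperm.nodup_iff.mpr hndF), hF, pcQ_filter]
  rw [hsqP, hpcQ]
  push_cast
  ring

-- ===== VERDICT (by name: the statement is the Claim_ definition above) =====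
theorem solution_spec : Claim_equal_solution := by
  intro A X _
  show solution A X = solution_alt A X
  simp only [solution, solution_alt]
  rw [PySem.Dict.keys_counter]
  rw [loops_eq (PySem.Dict.counter A) X (PySem.Set.ofList A) (PySem.Set.nodup_ofList A)]
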